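-- pv_equiv track=rewrite | github.com/Jus-tinZhu/MidtermReport | SplitFastaFile.py | split_fasta
-- ===== SOURCE A (Python) =====
-- def split_fasta(in_fasta, split_number):
--     if split_number <= len(in_fasta) and type(split_number) == int:
--         assert "split number issues"
--
--     splits = []
--     for i in range(split_number):
--         temp = {}
--         counter = 0
--
--         for entry in in_fasta:
--             if counter%split_number == i:
--                 temp[entry] = in_fasta[entry]
--             counter += 1
--         splits.append(temp)
--
--     return splits
-- ===== SOURCE B (Python) =====
-- def split_fasta(in_fasta, split_number):
--     splits = [dict() for _ in range(split_number)]
--     if not splits: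
--         return splits
--     for i, (key, value) in enumerate(in_fasta.items()):
--         splits[i % split_number][key] = value
--     return splits
-- ===== Notes on version B (the rewrite author's own statement) =====
-- stated objective: faster
-- what changed: A makes one full pass over the dict per output group (k passes, re-testing index % k == i each time); B makes a single enumerate pass, appending each entry directly to group index % k.
import Mathlib
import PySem

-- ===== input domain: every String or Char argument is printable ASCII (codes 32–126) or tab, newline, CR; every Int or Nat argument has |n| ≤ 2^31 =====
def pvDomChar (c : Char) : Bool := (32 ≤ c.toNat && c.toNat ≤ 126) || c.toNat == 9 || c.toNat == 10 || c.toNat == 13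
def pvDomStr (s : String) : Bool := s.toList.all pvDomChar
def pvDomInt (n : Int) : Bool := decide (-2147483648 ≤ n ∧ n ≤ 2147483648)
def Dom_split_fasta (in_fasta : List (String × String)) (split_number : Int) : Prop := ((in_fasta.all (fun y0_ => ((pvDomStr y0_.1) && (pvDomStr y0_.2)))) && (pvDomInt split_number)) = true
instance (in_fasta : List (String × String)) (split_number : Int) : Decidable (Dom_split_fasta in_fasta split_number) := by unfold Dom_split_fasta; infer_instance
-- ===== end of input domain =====

-- B replaces A's k passes over the dict (one per output group) by a single pass that appends
-- each entry to group (index % split_number): O(n+k) instead of O(n*k).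

-- ===== PORT A =====
-- A's opening 'if …: assert "split number issues"' asserts a non-empty (truthy) string literal,
-- so it never raises whatever the condition: a no-op, ported as nothing.
-- 'in_fasta[entry]' is a dict lookup of a key of that same dict: first-match association lookup
-- (the .getD "" default is unreachable, the key is a member).
def split_fasta (in_fasta : List (String × String)) (split_number : Int) : List (List (String × String)) :=
  (PySem.List.pyRange 0 split_number 1).foldl
    (fun (splits : List (List (String × String))) i =>
      let r := in_fasta.foldl
        (fun (p : PySem.Dict String String × Int) entry =>
          (if PySem.Int.mod p.2 split_number = i then
              p.1.insert entry.1 ((List.lookup entry.1 in_fasta).getD "")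
            else p.1,
           p.2 + 1))
        (PySem.Dict.empty, 0)
      splits ++ [r.1.items])
    []

-- ===== PORT B =====
-- 'splits[i % split_number]': past the empty-splits guard 0 < split_number, so the Python index
-- i % split_number lies in [0, split_number) = [0, len(splits)), and .toNat / .getD / .set are exact.
def split_fasta_alt (in_fasta : List (String × String)) (split_number : Int) : List (List (String × String)) :=
  let splits0 : List (PySem.Dict String String) :=
    (PySem.List.pyRange 0 split_number 1).map (fun _ => PySem.Dict.empty)
  if splits0.isEmpty then splits0.map PySem.Dict.items
  else
    ((PySem.List.enumerate in_fasta 0).foldl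
        (fun splits p =>
          let j := (PySem.Int.mod p.1 split_number).toNat
          splits.set j ((splits.getD j PySem.Dict.empty).insert p.2.1 p.2.2))
        splits0).map PySem.Dict.items

-- ===== PRECONDITION & SPEC =====
-- Pre_ only excludes association lists with duplicate keys, which do not model a Python dict
-- (the 'in_fasta' argument of both programs is a dict, whose keys are distinct — duplicate-key
-- lists are unrepresentable as Python inputs, so no input A accepts is excluded).
def Pre_split_fasta (in_fasta : List (String × String)) (split_number : Int) : Prop :=
  (in_fasta.map Prod.fst).Nodup
instance (in_fasta : List (String × String)) (split_number : Int) : Decidable (Pre_split_fasta in_fasta split_number) := by unfold Pre_split_fasta; infer_instance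

def pvWitness_split_fasta : (List (String × String)) × Int := ([("a", "1"), ("b", "2"), ("c", "3")], 2)

def Spec_split_fasta (in_fasta : List (String × String)) (split_number : Int) (out : List (List (String × String))) : Prop := out = split_fasta_alt in_fasta split_number
instance (in_fasta : List (String × String)) (split_number : Int) (out : List (List (String × String))) : Decidable (Spec_split_fasta in_fasta split_number out) := by unfold Spec_split_fasta; infer_instance

-- ===== CLAIM (what is proved, stated in full; the proofs are below) =====
def Claim_equal_split_fasta : Prop := ∀ (in_fasta : List (String × String)) (split_number : Int), Dom_split_fasta in_fasta split_number → Pre_split_fasta in_fasta split_number → Spec_split_fasta in_fasta split_number (split_fasta in_fasta split_number)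

-- ===== LEMMAS AND PROOFS =====

-- the entries (with their positions) that land in group j
def pvBucket (k : Int) (xs : List (String × String)) (c : Int) (j : Int) : List (Int × (String × String)) :=
  (PySem.List.enumerate xs c).filter (fun q => decide (PySem.Int.mod q.1 k = j))

theorem pv_getD_range_map {α : Type} (l : List α) (d : α) :
    (List.range l.length).map (fun j => l.getD j d) = l := by
  apply List.ext_getElem
  · simp
  · intro i h1 h2
    simp [List.getD_eq_getElem?_getD, List.getElem?_eq_getElem h2]

theorem pv_set_getD {α : Type} (l : List α) (j j0 : Nat) (v d : α) (hj0 : j0 < l.length) :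
    (l.set j0 v).getD j d = if j = j0 then v else l.getD j d := by
  rcases eq_or_ne j j0 with rfl | hne
  · simp [List.getD_eq_getElem?_getD, hj0]
  · simp [List.getD_eq_getElem?_getD, List.getElem?_set_ne (Ne.symm hne), hne]

theorem pv_lookup_of_nodup (a b : String) (l : List (String × String))
    (h : (l.map Prod.fst).Nodup) (hm : (a, b) ∈ l) : List.lookup a l = some b := by
  induction l with
  | nil => simp at hm
  | cons x t ih =>
    simp only [List.lookup]
    rcases List.mem_cons.mp hm with hm | hm
    · simp [← hm]
    · simp only [List.map_cons, List.nodup_cons, List.mem_map] at h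
      have hne : x.1 ≠ a := by
        intro heq
        exact h.1 ⟨(a, b), hm, heq.symm⟩
      simp [beq_eq_false_iff_ne.mpr (Ne.symm hne), ih h.2 hm]

-- A's inner loop: the explicit (dict, counter) fold is the insert-fold over the filtered enumeration
theorem pv_A_inner (k i : Int) (lk : String → String) :
    ∀ (xs : List (String × String)) (c : Int) (d : PySem.Dict String String),
    (xs.foldl
      (fun (p : PySem.Dict String String × Int) entry =>
        (if PySem.Int.mod p.2 k = i then p.1.insert entry.1 (lk entry.1) else p.1, p.2 + 1))
      (d, c)).1
    = ((PySem.List.enumerate xs c).filter (fun q => decide (PySem.Int.mod q.1 k = i))).foldl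
        (fun d q => d.insert q.2.1 (lk q.2.1)) d := by
  intro xs
  induction xs with
  | nil => intro c d; simp [PySem.List.enumerate_nil]
  | cons e t ih =>
    intro c d
    rw [PySem.List.enumerate_cons, List.foldl_cons, List.filter_cons]
    by_cases hc : PySem.Int.mod c k = i
    · simp only [hc, decide_true]
      exact ih (c + 1) (d.insert e.1 (lk e.1))
    · simp only [hc, decide_false]
      exact ih (c + 1) d

-- the insert-fold over a bucket appends fresh distinct keys: its items are the bucket's entries
theorem pv_items_bucket (k j c : Int) (xs : List (String × String))
    (hnd : (xs.map Prod.fst).Nodup) (v : Int × (String × String) → String)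
    (hv : ∀ q ∈ pvBucket k xs c j, v q = q.2.2) :
    ((pvBucket k xs c j).foldl (fun d q => d.insert q.2.1 (v q)) PySem.Dict.empty).items
    = (pvBucket k xs c j).map (·.2) := by
  have hsub : ((pvBucket k xs c j).map (fun q => q.2)).Sublist xs := by
    have h1 : (pvBucket k xs c j).Sublist (PySem.List.enumerate xs c) := List.filter_sublist
    have h2 := h1.map (fun q : Int × (String × String) => q.2)
    rwa [PySem.List.map_snd_enumerate] at h2
  have hfresh : ∀ q ∈ pvBucket k xs c j,
      (PySem.Dict.empty : PySem.Dict String String).contains q.2.1 = false := by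
    intro q _; simp
  have hkeys : ((pvBucket k xs c j).map (fun q => q.2.1)).Nodup := by
    have : ((pvBucket k xs c j).map (fun q => q.2)).map Prod.fst |>.Nodup :=
      (hsub.map Prod.fst).nodup hnd
    simpa [List.map_map, Function.comp] using this
  rw [PySem.Dict.items_foldl_insert_fresh _ _ _ _ hfresh hkeys]
  rw [show (PySem.Dict.empty : PySem.Dict String String).items = [] from rfl, List.nil_append]
  apply List.map_congr_left
  intro q hq
  rw [hv q hq]

-- B's loop invariant: after folding the enumeration into k buckets, bucket j holds exactly
-- the insert-fold of the entries whose index is ≡ j (mod k)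
theorem pv_B_inv (k : Int) (hk : 0 < k) :
    ∀ (xs : List (String × String)) (c : Int) (splits : List (PySem.Dict String String)),
    splits.length = k.toNat →
    (PySem.List.enumerate xs c).foldl
      (fun splits p =>
        let j := (PySem.Int.mod p.1 k).toNat
        splits.set j ((splits.getD j PySem.Dict.empty).insert p.2.1 p.2.2))
      splits
    = (List.range k.toNat).map (fun (j : Nat) =>
        ((PySem.List.enumerate xs c).filter (fun q => decide (PySem.Int.mod q.1 k = (j : Int)))).foldl
          (fun d q => d.insert q.2.1 q.2.2) (splits.getD j PySem.Dict.empty)) := by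
  intro xs
  induction xs with
  | nil =>
    intro c splits hlen
    simp only [PySem.List.enumerate_nil, List.foldl_nil, List.filter_nil]
    rw [← hlen, pv_getD_range_map]
  | cons e t ih =>
    intro c splits hlen
    have hmnn : 0 ≤ PySem.Int.mod c k := PySem.Int.mod_nonneg c hk
    have hmlt : PySem.Int.mod c k < k := PySem.Int.mod_lt c hk
    have hj0lt : (PySem.Int.mod c k).toNat < k.toNat := by omega
    rw [PySem.List.enumerate_cons, List.foldl_cons]
    rw [ih (c + 1) _ (by simpa using hlen)]
    apply List.map_congr_left
    intro j hj
    have hjlt : j < k.toNat := List.mem_range.mp hj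
    rw [List.filter_cons]
    by_cases hcj : PySem.Int.mod c k = (j : Int)
    · have hjlen : j < splits.length := by omega
      simp only [hcj, decide_true, Int.toNat_natCast, if_true]
      rw [pv_set_getD _ _ _ _ _ hjlen, if_pos rfl]
      simp
    · have hj0 : j ≠ (PySem.Int.mod c k).toNat := by omega
      simp only [hcj, decide_false]
      rw [pv_set_getD _ _ _ _ _ (by omega), if_neg hj0]
      simp

theorem pv_getD_map_const {α β : Type} (l : List α) (d : β) (j : Nat) :
    (l.map (fun _ => d)).getD j d = d := by
  simp only [List.getD_eq_getElem?_getD, List.getElem?_map]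
  cases l[j]? <;> simp

-- ===== VERDICT (by name: the statement is the Claim_ definition above) =====
theorem split_fasta_spec : Claim_equal_split_fasta := by
  intro in_fasta k _hdom hnd
  unfold Spec_split_fasta
  by_cases hk : 0 < k
  · -- identify both sides with (range k.toNat).map (fun j => (pvBucket k in_fasta 0 j).map (·.2))
    have hA : split_fasta in_fasta k
        = (List.range k.toNat).map (fun (j : Nat) => (pvBucket k in_fasta 0 (j : Int)).map (·.2)) := by
      unfold split_fasta
      rw [PySem.List.foldl_append_singleton_eq_map]
      rw [PySem.List.pyRange_one, List.map_map]
      simp only [Int.sub_zero, List.nil_append]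
      apply List.map_congr_left
      intro j _
      simp only [Function.comp, zero_add]
      rw [pv_A_inner k (j : Int) (fun s => (List.lookup s in_fasta).getD "") in_fasta 0 PySem.Dict.empty]
      exact pv_items_bucket k (j : Int) 0 in_fasta hnd _ (by
        intro q hq
        have hqmem : q.2 ∈ in_fasta := by
          have h1 : q ∈ PySem.List.enumerate in_fasta 0 := List.mem_of_mem_filter hq
          have h2 := PySem.List.map_snd_enumerate in_fasta (0 : Int)
          rw [← h2]
          exact List.mem_map_of_mem h1
        rw [pv_lookup_of_nodup q.2.1 q.2.2 in_fasta hnd hqmem]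
        rfl)
    have hlen : ((PySem.List.pyRange 0 k 1).map
        (fun _ => (PySem.Dict.empty : PySem.Dict String String))).length = k.toNat := by
      simp [PySem.List.length_pyRange_one]
    have hie : ((PySem.List.pyRange 0 k 1).map
        (fun _ => (PySem.Dict.empty : PySem.Dict String String))).isEmpty = false := by
      have h0 : 0 < k.toNat := by omega
      rw [List.isEmpty_eq_false_iff_exists_mem]
      have := List.exists_mem_of_length_pos (l := (PySem.List.pyRange 0 k 1).map
        (fun _ => (PySem.Dict.empty : PySem.Dict String String))) (by omega)
      exact this
    have hB : split_fasta_alt in_fasta k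
        = (List.range k.toNat).map (fun (j : Nat) => (pvBucket k in_fasta 0 (j : Int)).map (·.2)) := by
      show (if ((PySem.List.pyRange 0 k 1).map
            (fun _ => (PySem.Dict.empty : PySem.Dict String String))).isEmpty = true
          then ((PySem.List.pyRange 0 k 1).map
            (fun _ => (PySem.Dict.empty : PySem.Dict String String))).map PySem.Dict.items
          else ((PySem.List.enumerate in_fasta 0).foldl
              (fun splits p =>
                let j := (PySem.Int.mod p.1 k).toNat
                splits.set j ((splits.getD j PySem.Dict.empty).insert p.2.1 p.2.2))
              ((PySem.List.pyRange 0 k 1).map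
                (fun _ => (PySem.Dict.empty : PySem.Dict String String)))).map PySem.Dict.items) = _
      rw [hie]
      simp only [Bool.false_eq_true, if_false]
      rw [pv_B_inv k hk in_fasta 0 _ hlen, List.map_map]
      apply List.map_congr_left
      intro j _
      simp only [Function.comp, pv_getD_map_const]
      exact pv_items_bucket k (j : Int) 0 in_fasta hnd _ (fun q _ => rfl)
    rw [hA, hB]
  · -- split_number ≤ 0: A's range loop is empty, B's guard sees no groups; both return []
    have hr : PySem.List.pyRange 0 k 1 = [] := PySem.List.pyRange_one_eq_nil (by omega)
    unfold split_fasta split_fasta_alt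
    simp [hr]
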